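-- pv_equiv track=rewrite | github.com/21dannull/MaTris | player.py | can_put
-- ===== SOURCE A (Python) =====
-- def can_put(piece, matrix):
--     under = False
--     for sq in piece:
--         # out of bounds
--         if sq[0] < 0 or sq[0] > 21 or sq[1] < 0 or sq[1] > 9:
--             return False
--         # square already filled
--         if matrix[(sq[0], sq[1])] is not None:
--             return False
--         # there is a square under the piece
--         if sq[0] == 21 or matrix[(sq[0] + 1, sq[1])] is not None:
--             under = True
--     return under
-- ===== SOURCE B (Python) =====
-- def can_put(piece, matrix):
--     # Set-algebra formulation: build the set of playable cells (present in the
--     # matrix, in bounds, empty) once, then decide both questions by subset tests: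
--     # the piece fits iff its cells are a subset of the playable cells, and it
--     # rests iff the piece shifted one row down leaves the playable region.
--     playable = {cell for cell, value in matrix.items()
--                 if value is None and 0 <= cell[0] <= 21 and 0 <= cell[1] <= 9}
--     cells = {(sq[0], sq[1]) for sq in piece}
--     if not cells <= playable:
--         return False
--     below = {(r + 1, c) for r, c in cells}
--     return not below <= playable
-- ===== Notes on version B (the rewrite author's own statement) =====
-- stated objective: alternative
-- what changed: Replaces A's single interleaved loop (per-square bounds checks, dict lookups and an 'under' accumulator flag with early returns) by a set-algebra formulation: the set of playable cells (present, empty, in-bounds) is built once from the matrix, the piece fits iff its cell set is a subset of it, and it rests iff the piece shifted one row down escapes it.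
import Mathlib
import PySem

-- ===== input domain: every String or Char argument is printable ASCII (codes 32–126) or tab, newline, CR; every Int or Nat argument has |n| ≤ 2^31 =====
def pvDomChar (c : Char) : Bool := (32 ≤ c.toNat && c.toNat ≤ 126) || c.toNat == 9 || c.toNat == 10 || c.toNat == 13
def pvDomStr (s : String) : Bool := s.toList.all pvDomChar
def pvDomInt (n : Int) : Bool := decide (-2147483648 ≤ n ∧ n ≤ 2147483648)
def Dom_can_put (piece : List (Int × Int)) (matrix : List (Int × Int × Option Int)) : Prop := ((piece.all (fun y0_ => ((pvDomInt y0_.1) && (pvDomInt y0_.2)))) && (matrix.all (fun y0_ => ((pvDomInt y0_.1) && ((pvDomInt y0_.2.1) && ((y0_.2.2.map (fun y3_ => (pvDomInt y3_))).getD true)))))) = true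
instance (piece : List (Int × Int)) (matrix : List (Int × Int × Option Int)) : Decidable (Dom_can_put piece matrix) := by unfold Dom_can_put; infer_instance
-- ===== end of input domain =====

-- B replaces A's per-square loop with matrix lookups by a set-algebra formulation:
-- build the set of playable cells once, then two subset tests; objective: alternative.

-- dict lookup matrix[(r, c)]: first entry of the association list with that key
-- (none = the key is absent, where Python raises KeyError; excluded by Pre_can_put)
def pvKey (matrix : List (Int × Int × Option Int)) (r c : Int) : Option (Option Int) :=
  (matrix.find? (fun e => e.1 == r && e.2.1 == c)).map (fun e => e.2.2)

-- in bounds, and the cell at sq is present and empty (the condition under which A's loop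
-- proceeds past a square)
def pvInb (sq : Int × Int) : Prop := 0 ≤ sq.1 ∧ sq.1 ≤ 21 ∧ 0 ≤ sq.2 ∧ sq.2 ≤ 9
def pvOpen (matrix : List (Int × Int × Option Int)) (sq : Int × Int) : Prop :=
  pvKey matrix sq.1 sq.2 = some none

-- ===== PORT A =====
-- A's loop: 'under' accumulator, early False returns.
def canPutLoop (matrix : List (Int × Int × Option Int)) : List (Int × Int) → Bool → Bool
  | [], under => under
  | sq :: rest, under =>
    if sq.1 < 0 ∨ 21 < sq.1 ∨ sq.2 < 0 ∨ 9 < sq.2 then false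
    else if ((pvKey matrix sq.1 sq.2).getD none).isSome then false
    else if sq.1 = 21 ∨ ((pvKey matrix (sq.1 + 1) sq.2).getD none).isSome then
      canPutLoop matrix rest true
    else canPutLoop matrix rest under

def can_put (piece : List (Int × Int)) (matrix : List (Int × Int × Option Int)) : Bool :=
  canPutLoop matrix piece false

-- ===== PORT B =====
-- the set comprehension over matrix.items(): playable = present, empty, in-bounds cells
def pvPlayable (matrix : List (Int × Int × Option Int)) : PySem.Set (Int × Int) :=
  PySem.Set.ofList
    ((matrix.filter (fun e => e.2.2 == none && decide (0 ≤ e.1) && decide (e.1 ≤ 21)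
        && decide (0 ≤ e.2.1) && decide (e.2.1 ≤ 9))).map (fun e => (e.1, e.2.1)))

def can_put_alt (piece : List (Int × Int)) (matrix : List (Int × Int × Option Int)) : Bool :=
  let playable := pvPlayable matrix
  let cells : PySem.Set (Int × Int) := PySem.Set.ofList piece
  if PySem.Set.issubset cells playable then
    !(PySem.Set.issubset
        (PySem.Set.ofList (cells.map (fun sq => (sq.1 + 1, sq.2)))) playable)
  else false

-- ===== PRECONDITION & SPEC =====
-- Pre_ (i) restricts matrix to association lists without duplicate keys — the argument is a
-- Python dict, whose keys are necessarily distinct, so no Python input is excluded — and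
-- (ii) excludes exactly the inputs on which Python A raises KeyError: whenever every
-- square before position i is in bounds with an empty cell (so A's loop reaches square i),
-- an in-bounds square i must have its own key in the dict and — if its cell is empty and
-- above row 21 — the key directly below it too.
def Pre_can_put (piece : List (Int × Int)) (matrix : List (Int × Int × Option Int)) : Prop :=
  (matrix.map (fun e => (e.1, e.2.1))).Nodup ∧
  ∀ i, (h : i < piece.length) →
    (∀ j, (hj : j < piece.length) → j < i → pvInb piece[j] ∧ pvOpen matrix piece[j]) →
    (pvInb piece[i] →
      (pvKey matrix piece[i].1 piece[i].2).isSome = true ∧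
        (pvOpen matrix piece[i] ∧ piece[i].1 < 21 →
          (pvKey matrix (piece[i].1 + 1) piece[i].2).isSome = true))
instance (piece : List (Int × Int)) (matrix : List (Int × Int × Option Int)) : Decidable (Pre_can_put piece matrix) := by
  unfold Pre_can_put pvInb pvOpen
  refine @instDecidableAnd _ _ ?_ ?_ <;> infer_instance

def pvWitness_can_put : (List (Int × Int)) × (List (Int × Int × Option Int)) :=
  ([(20, 0)], [(20, 0, none), (21, 0, some 3)])

def Spec_can_put (piece : List (Int × Int)) (matrix : List (Int × Int × Option Int)) (out : Bool) : Prop := out = can_put_alt piece matrix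
instance (piece : List (Int × Int)) (matrix : List (Int × Int × Option Int)) (out : Bool) : Decidable (Spec_can_put piece matrix out) := by unfold Spec_can_put; infer_instance

-- ===== CLAIM (what is proved, stated in full; the proofs are below) =====
def Claim_equal_can_put : Prop := ∀ (piece : List (Int × Int)) (matrix : List (Int × Int × Option Int)), Dom_can_put piece matrix → Pre_can_put piece matrix → Spec_can_put piece matrix (can_put piece matrix)

-- ===== LEMMAS AND PROOFS =====

-- A's per-square conditions, as Booleans (the common normal form both proofs target)
def pvValid (matrix : List (Int × Int × Option Int)) (sq : Int × Int) : Bool :=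
  decide (0 ≤ sq.1) && decide (sq.1 ≤ 21) && decide (0 ≤ sq.2) && decide (sq.2 ≤ 9) &&
    (pvKey matrix sq.1 sq.2 == some none)

def pvRests (matrix : List (Int × Int × Option Int)) (sq : Int × Int) : Bool :=
  decide (sq.1 = 21) || !(pvKey matrix (sq.1 + 1) sq.2 == some none)

-- A's loop, on a Pre_-respecting suffix, equals "validate all, then under OR any rests".
theorem canPutLoop_eq (matrix : List (Int × Int × Option Int)) :
    ∀ (piece : List (Int × Int)) (under : Bool),
      (∀ i, (h : i < piece.length) →
        (∀ j, (hj : j < piece.length) → j < i → pvInb piece[j] ∧ pvOpen matrix piece[j]) →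
        (pvInb piece[i] →
          (pvKey matrix piece[i].1 piece[i].2).isSome = true ∧
            (pvOpen matrix piece[i] ∧ piece[i].1 < 21 →
              (pvKey matrix (piece[i].1 + 1) piece[i].2).isSome = true))) →
      canPutLoop matrix piece under =
        if piece.all (pvValid matrix) then (under || piece.any (pvRests matrix)) else false := by
  intro piece
  induction piece with
  | nil => intro under _; simp [canPutLoop]
  | cons sq rest ih =>
    intro under hpre
    have hsq := hpre 0 (by simp) (by omega)
    simp only [List.getElem_cons_zero] at hsq
    by_cases hb : sq.1 < 0 ∨ 21 < sq.1 ∨ sq.2 < 0 ∨ 9 < sq.2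
    · have hv : pvValid matrix sq = false := by
        unfold pvValid
        rcases hb with h | h | h | h <;> simp [h]
      simp [canPutLoop, hb, hv]
    · have hinb : pvInb sq := by
        unfold pvInb; simp only [not_or, not_lt] at hb; omega
      obtain ⟨hkey, hkey2⟩ := hsq hinb
      obtain ⟨v, hv⟩ := Option.isSome_iff_exists.mp hkey
      by_cases hf : v = none
      · -- cell empty: validation of sq passes; the tail still satisfies the hypothesis
        subst hf
        have hopen : pvOpen matrix sq := hv
        have hrest : ∀ i, (h : i < rest.length) →
            (∀ j, (hj : j < rest.length) → j < i → pvInb rest[j] ∧ pvOpen matrix rest[j]) →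
            (pvInb rest[i] →
              (pvKey matrix rest[i].1 rest[i].2).isSome = true ∧
                (pvOpen matrix rest[i] ∧ rest[i].1 < 21 →
                  (pvKey matrix (rest[i].1 + 1) rest[i].2).isSome = true)) := by
          intro i h hpref
          have := hpre (i + 1) (by simpa using Nat.succ_lt_succ h)
            (fun j hj hlt => by
              cases j with
              | zero => simpa using ⟨hinb, hopen⟩
              | succ j' =>
                have := hpref j' (by simpa using Nat.lt_of_succ_lt_succ hj)
                  (Nat.lt_of_succ_lt_succ hlt)
                simpa using this)
          simpa using this
        have hvalid : pvValid matrix sq = true := by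
          unfold pvValid
          simp [hv, hinb.1, hinb.2.1, hinb.2.2.1, hinb.2.2.2]
        have hrcond : (sq.1 = 21 ∨ ((pvKey matrix (sq.1 + 1) sq.2).getD none).isSome) ↔
            pvRests matrix sq = true := by
          unfold pvRests
          by_cases h21 : sq.1 = 21
          · simp [h21]
          · have hlt : sq.1 < 21 := lt_of_le_of_ne hinb.2.1 h21
            obtain ⟨w, hw⟩ := Option.isSome_iff_exists.mp (hkey2 ⟨hopen, hlt⟩)
            cases w <;> simp [h21, hw]
        by_cases hr : pvRests matrix sq = true
        · have : canPutLoop matrix (sq :: rest) under = canPutLoop matrix rest true := by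
            simp only [canPutLoop]
            rw [if_neg hb, if_neg (by simp [hv]), if_pos (hrcond.mpr hr)]
          rw [this, ih true hrest]
          simp [hvalid, hr]
        · have : canPutLoop matrix (sq :: rest) under = canPutLoop matrix rest under := by
            simp only [canPutLoop]
            rw [if_neg hb, if_neg (by simp [hv]), if_neg (fun hc => hr (hrcond.mp hc))]
          rw [this, ih under hrest]
          simp [hvalid, hr]
      · -- cell filled: A returns False, B's validation fails
        have hvalid : pvValid matrix sq = false := by
          unfold pvValid; cases v with
          | none => exact absurd rfl hf
          | some x => simp [hv]
        have : canPutLoop matrix (sq :: rest) under = false := by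
          simp only [canPutLoop]
          rw [if_neg hb, if_pos (by cases v with | none => exact absurd rfl hf | some x => simp [hv])]
        simp [this, hvalid]

-- membership in B's playable set, under key-uniqueness, is exactly pvValid
theorem mem_pvPlayable (matrix : List (Int × Int × Option Int))
    (hnd : (matrix.map (fun e => (e.1, e.2.1))).Nodup) (sq : Int × Int) :
    sq ∈ pvPlayable matrix ↔ pvValid matrix sq = true := by
  unfold pvPlayable pvValid
  rw [PySem.Set.mem_ofList]
  simp only [List.mem_map, List.mem_filter, Bool.and_eq_true, beq_iff_eq, decide_eq_true_eq]
  constructor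
  · rintro ⟨e, ⟨hem, ⟨⟨⟨hv0, hb1⟩, hb2⟩, hb3⟩, hb4⟩, hkey⟩
    subst hkey
    refine ⟨⟨⟨⟨hb1, hb2⟩, hb3⟩, hb4⟩, ?_⟩
    have hp : (fun x => x.1 == e.1 && x.2.1 == e.2.1) e = true := by simp
    have hs : (matrix.find? (fun x => x.1 == e.1 && x.2.1 == e.2.1)).isSome :=
      List.find?_isSome.mpr ⟨e, hem, hp⟩
    obtain ⟨e', he'⟩ := Option.isSome_iff_exists.mp hs
    have he'm := List.mem_of_find?_eq_some he'
    have he'p := List.find?_some he'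
    simp only [Bool.and_eq_true, beq_iff_eq] at he'p
    have hee : e' = e :=
      List.inj_on_of_nodup_map hnd he'm hem (by simp [he'p.1, he'p.2])
    unfold pvKey
    rw [he', hee]
    simp [hv0]
  · rintro ⟨⟨⟨⟨hb1, hb2⟩, hb3⟩, hb4⟩, hk⟩
    unfold pvKey at hk
    obtain ⟨e, hfe, hval⟩ := Option.map_eq_some_iff.mp hk
    have hem := List.mem_of_find?_eq_some hfe
    have hp := List.find?_some hfe
    simp only [Bool.and_eq_true, beq_iff_eq] at hp
    exact ⟨e, ⟨hem, ⟨⟨⟨hval, by rw [hp.1]; exact hb1⟩, by rw [hp.1]; exact hb2⟩,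
      by rw [hp.2]; exact hb3⟩, by rw [hp.2]; exact hb4⟩, by rw [hp.1, hp.2]⟩

-- B, under Pre_, reduces to the same "all valid, then any rests" normal form
theorem can_put_alt_eq (piece : List (Int × Int)) (matrix : List (Int × Int × Option Int))
    (hpre : Pre_can_put piece matrix) :
    can_put_alt piece matrix =
      if piece.all (pvValid matrix) then piece.any (pvRests matrix) else false := by
  obtain ⟨hnd, hkeys⟩ := hpre
  show (if PySem.Set.issubset (PySem.Set.ofList piece) (pvPlayable matrix) then
      !(PySem.Set.issubset
          (PySem.Set.ofList ((PySem.Set.ofList piece).map (fun sq => (sq.1 + 1, sq.2))))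
          (pvPlayable matrix))
    else false) = _
  have hsub : PySem.Set.issubset (PySem.Set.ofList piece) (pvPlayable matrix)
      = piece.all (pvValid matrix) := by
    rw [Bool.eq_iff_iff, PySem.Set.issubset_iff, List.all_eq_true]
    constructor
    · intro h x hx
      exact (mem_pvPlayable matrix hnd x).mp (h x ((PySem.Set.mem_ofList _ _).mpr hx))
    · intro h x hx
      exact (mem_pvPlayable matrix hnd x).mpr (h x ((PySem.Set.mem_ofList _ _).mp hx))
  rw [hsub]
  by_cases hall : piece.all (pvValid matrix) = true
  · rw [if_pos hall, if_pos hall]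
    -- every square is open, so Pre_'s below-key guarantee applies to each member
    have hvalid : ∀ x ∈ piece, pvValid matrix x = true := List.all_eq_true.mp hall
    have hmem : ∀ x ∈ piece, pvInb x ∧ pvOpen matrix x := by
      intro x hx
      have := hvalid x hx
      unfold pvValid at this
      simp only [Bool.and_eq_true, beq_iff_eq, decide_eq_true_eq] at this
      exact ⟨⟨this.1.1.1.1, this.1.1.1.2, this.1.1.2, this.1.2⟩, this.2⟩
    have hbelow : ∀ x ∈ piece, pvOpen matrix x ∧ x.1 < 21 →
        (pvKey matrix (x.1 + 1) x.2).isSome = true := by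
      intro x hx
      obtain ⟨i, hi, hxi⟩ := List.getElem_of_mem hx
      subst hxi
      exact (hkeys i hi (fun j hj _ => hmem _ (List.getElem_mem hj))
        (hmem _ (List.getElem_mem hi)).1).2
    -- pointwise: below-cell ∉ playable ↔ pvRests, for valid squares
    have hpt : ∀ x ∈ piece,
        ((x.1 + 1, x.2) ∉ pvPlayable matrix ↔ pvRests matrix x = true) := by
      intro x hx
      obtain ⟨hinb, hopen⟩ := hmem x hx
      rw [mem_pvPlayable matrix hnd]
      unfold pvRests
      have h0 : (0:Int) ≤ x.1 ∧ x.1 ≤ 21 ∧ 0 ≤ x.2 ∧ x.2 ≤ 9 := hinb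
      by_cases h21 : x.1 = 21
      · have hf : pvValid matrix (22, x.2) = false := by
          unfold pvValid; norm_num
        simp [hf, h21]
      · have hlt : x.1 < 21 := lt_of_le_of_ne h0.2.1 h21
        obtain ⟨w, hw⟩ := Option.isSome_iff_exists.mp (hbelow x hx ⟨hopen, hlt⟩)
        have hv : pvValid matrix (x.1 + 1, x.2) = (w == none) := by
          unfold pvValid
          have b1 : (0:Int) ≤ x.1 + 1 := by have := h0.1; omega
          have b2 : x.1 + 1 ≤ 21 := by have := h0.2.1; omega
          simp [hw, b1, b2, h0.2.2.1, h0.2.2.2]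
        cases w <;> simp [hv, hw, h21]
    -- the shifted-set subset test, unfolded to a quantifier over piece
    rw [Bool.eq_iff_iff]
    simp only [Bool.not_eq_true']
    rw [Bool.eq_false_iff, List.any_eq_true]
    constructor
    · intro h
      by_contra hc
      push Not at hc
      apply h
      rw [PySem.Set.issubset_iff]
      intro y hy
      rw [PySem.Set.mem_ofList] at hy
      obtain ⟨x, hxs, hxy⟩ := List.mem_map.mp hy
      have hxp : x ∈ piece := (PySem.Set.mem_ofList _ _).mp hxs
      subst hxy
      by_contra hny
      exact hc x hxp ((hpt x hxp).mp hny)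
    · rintro ⟨x, hxp, hr⟩ hsubt
      rw [PySem.Set.issubset_iff] at hsubt
      exact (hpt x hxp).mpr hr (hsubt _ ((PySem.Set.mem_ofList _ _).mpr
        (List.mem_map.mpr ⟨x, (PySem.Set.mem_ofList _ _).mpr hxp, rfl⟩)))
  · rw [if_neg hall, if_neg hall]

-- ===== VERDICT (by name: the statement is the Claim_ definition above) =====
theorem can_put_spec : Claim_equal_can_put := by
  intro piece matrix _ hpre
  unfold Spec_can_put can_put
  rw [canPutLoop_eq matrix piece false hpre.2, can_put_alt_eq piece matrix hpre]
  simp
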